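-- pv_equiv track=rewrite | github.com/linhdvu14/cp-sols | sols/CodeForces/2033_d3/B_Sakurako_and_Water.py | solve
-- ===== SOURCE A (Python) =====
-- def solve(N, grid):
--     res = 0
--     for i in range(N):
--         starts = list(set([(i, 0), (0, i)]))
--         for r, c in starts:
--             mx = 0
--             for _ in range(N):
--                 if r == N or c == N: break
--                 if grid[r][c] < 0: mx = max(mx, -grid[r][c])
--                 r += 1
--                 c += 1
--             res += mx
--
--     return res
-- ===== SOURCE B (Python) =====
-- def solve(N, grid):
--     best = {}
--     for i in range(N):
--         for j in range(N):
--             v = grid[i][j]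
--             if v < 0:
--                 d = i - j
--                 best[d] = max(best.get(d, 0), -v)
--     return sum(best.values())
-- ===== Notes on version B (the rewrite author's own statement) =====
-- stated objective: simpler
-- what changed: Replaces A's per-diagonal crawl (dedup'd start points, inner down-right walk with break) by one flat row-major pass that maintains a dict of max negative magnitudes keyed by i-j and sums its values.
import Mathlib
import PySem

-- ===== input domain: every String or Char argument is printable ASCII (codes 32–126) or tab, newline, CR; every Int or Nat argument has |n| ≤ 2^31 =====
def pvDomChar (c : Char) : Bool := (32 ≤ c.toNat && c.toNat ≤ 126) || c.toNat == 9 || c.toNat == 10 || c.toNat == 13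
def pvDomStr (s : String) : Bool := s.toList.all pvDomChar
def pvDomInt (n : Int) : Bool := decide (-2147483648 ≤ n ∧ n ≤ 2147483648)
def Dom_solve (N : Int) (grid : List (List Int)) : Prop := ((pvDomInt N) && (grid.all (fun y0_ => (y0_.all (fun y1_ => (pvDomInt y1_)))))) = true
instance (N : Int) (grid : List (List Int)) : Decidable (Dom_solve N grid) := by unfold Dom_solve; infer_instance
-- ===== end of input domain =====

-- B replaces A's per-diagonal crawl (dedup'd start points, down-right walk with break) by one flat
-- row-major pass maintaining a dict of max negative magnitudes keyed by i-j, then sums its values.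


-- ===== PORT A =====
-- inner 'for _ in range(N): if r == N or c == N: break; …' as fuel recursion (fuel = N iterations)
def walkA (grid : List (List Int)) (N : Int) : Nat → Int → Int → Int → Int
  | 0, _, _, mx => mx
  | fuel+1, r, c, mx =>
    if r = N ∨ c = N then mx
    else
      let v := PySem.List.pyGetD (PySem.List.pyGetD grid r []) c 0
      walkA grid N fuel (r+1) (c+1) (if v < 0 then max mx (-v) else mx)

def solve (N : Int) (grid : List (List Int)) : Int :=
  (PySem.List.pyRange 0 N 1).foldl (fun res i =>
    (PySem.Set.ofList [(i, (0:Int)), ((0:Int), i)]).foldl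
      (fun res rc => res + walkA grid N N.toNat rc.1 rc.2 0) res) 0

-- ===== PORT B =====
def solve_alt (N : Int) (grid : List (List Int)) : Int :=
  let best : PySem.Dict Int Int :=
    (PySem.List.pyRange 0 N 1).foldl (fun best i =>
      (PySem.List.pyRange 0 N 1).foldl (fun best j =>
        let v := PySem.List.pyGetD (PySem.List.pyGetD grid i []) j 0
        if v < 0 then best.modify (i - j) 0 (fun m => max m (-v)) else best
        ) best) PySem.Dict.empty
  best.values.sum

-- ===== PRECONDITION & SPEC =====
-- Pre_ excludes exactly the inputs where Python A raises IndexError: some needed cell (i,j), 0 ≤ i,j < N, missing.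
def Pre_solve (N : Int) (grid : List (List Int)) : Prop :=
  0 < N → (N ≤ (grid.length : Int) ∧ ∀ row ∈ grid.take N.toNat, N ≤ (row.length : Int))
instance (N : Int) (grid : List (List Int)) : Decidable (Pre_solve N grid) := by unfold Pre_solve; infer_instance
def pvWitness_solve : Int × List (List Int) := (2, [[1, -2], [-3, 4]])

def Spec_solve (N : Int) (grid : List (List Int)) (out : Int) : Prop := out = solve_alt N grid
instance (N : Int) (grid : List (List Int)) (out : Int) : Decidable (Spec_solve N grid out) := by unfold Spec_solve; infer_instance

-- ===== CLAIM (what is proved, stated in full; the proofs are below) =====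
def Claim_equal_solve : Prop := ∀ (N : Int) (grid : List (List Int)), Dom_solve N grid → Pre_solve N grid → Spec_solve N grid (solve N grid)

-- ===== LEMMAS AND PROOFS =====

-- the value Python reads at cell p (both ports read it through pyGetD)
def pvVal (grid : List (List Int)) (p : Int × Int) : Int :=
  PySem.List.pyGetD (PySem.List.pyGetD grid p.1 []) p.2 0

-- all cells (i, j), 0 ≤ i, j < N, in B's row-major order
def pvCells (N : Int) : List (Int × Int) :=
  (PySem.List.pyRange 0 N 1).flatMap (fun i => (PySem.List.pyRange 0 N 1).map (fun j => (i, j)))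

def pvNegCells (N : Int) (grid : List (List Int)) : List (Int × Int) :=
  (pvCells N).filter (fun p => decide (pvVal grid p < 0))

-- max negative magnitude on diagonal d (0 if none)
def pvM (N : Int) (grid : List (List Int)) (d : Int) : Int :=
  (((pvNegCells N grid).filter (fun p => decide (p.1 - p.2 = d))).map
    (fun p => -(pvVal grid p))).foldl max 0

lemma pv_mem_cells (N : Int) (p : Int × Int) :
    p ∈ pvCells N ↔ 0 ≤ p.1 ∧ p.1 < N ∧ 0 ≤ p.2 ∧ p.2 < N := by
  obtain ⟨a, b⟩ := p
  simp only [pvCells, List.mem_flatMap, List.mem_map, PySem.List.mem_pyRange_one, Prod.mk.injEq]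
  constructor
  · rintro ⟨i, hi, j, hj, rfl, rfl⟩; exact ⟨hi.1, hi.2, hj.1, hj.2⟩
  · rintro ⟨h1, h2, h3, h4⟩; exact ⟨a, ⟨h1, h2⟩, b, ⟨h3, h4⟩, rfl, rfl⟩

lemma pv_nodup_pairs {l₁ l₂ : List Int} (h1 : l₁.Nodup) (h2 : l₂.Nodup) :
    (l₁.flatMap (fun i => l₂.map (fun j => (i, j)))).Nodup := by
  induction l₁ with
  | nil => simp
  | cons a t ih =>
    rw [List.nodup_cons] at h1
    rw [List.flatMap_cons]
    refine List.Nodup.append ?_ (ih h1.2) ?_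
    · exact h2.map (fun x y h => by simpa using h)
    · intro x hx hx'
      simp only [List.mem_map] at hx
      simp only [List.mem_flatMap, List.mem_map] at hx'
      obtain ⟨j, _, rfl⟩ := hx
      obtain ⟨i, hi, j', _, hij⟩ := hx'
      have : i = a := by cases hij; rfl
      exact h1.1 (this ▸ hi)

lemma pv_nodup_cells (N : Int) : (pvCells N).Nodup :=
  pv_nodup_pairs (PySem.List.nodup_pyRange_one 0 N) (PySem.List.nodup_pyRange_one 0 N)

-- the cells of diagonal r - c (start (r,c), min r c = 0) are exactly A's walk cells
lemma pv_diag_perm (N r c : Int) (hr0 : 0 ≤ r) (hc0 : 0 ≤ c) (hmin : min r c = 0)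
    (hrN : r ≤ N) (hcN : c ≤ N) :
    ((pvCells N).filter (fun p => decide (p.1 - p.2 = r - c))).Perm
      ((List.range (N - max r c).toNat).map (fun (t : Nat) => (r + (t : Int), c + (t : Int)))) := by
  have hminmax := min_le_max (a := r) (b := c)
  have hmax1 := le_max_left r c
  have hmax2 := le_max_right r c
  have hmaxle : max r c ≤ N := max_le hrN hcN
  rw [List.perm_ext_iff_of_nodup ((pv_nodup_cells N).filter _)
      ((List.nodup_range).map (by intro x y h; simp only [Prod.mk.injEq] at h; omega))]
  intro p
  obtain ⟨a, b⟩ := p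
  simp only [List.mem_filter, pv_mem_cells, List.mem_map, List.mem_range, decide_eq_true_eq,
    Prod.mk.injEq]
  constructor
  · rintro ⟨⟨h1, h2, h3, h4⟩, h5⟩
    refine ⟨(a - r).toNat, by omega, by omega, by omega⟩
  · rintro ⟨t, ht, rfl, rfl⟩
    omega

lemma pv_walk_eq (grid : List (List Int)) (N : Int) (fuel : Nat) (r c mx : Int)
    (hr : r ≤ N) (hc : c ≤ N) (hf : (N - max r c).toNat ≤ fuel) :
    walkA grid N fuel r c mx =
      ((List.range (N - max r c).toNat).map (fun (t : Nat) => (r + (t : Int), c + (t : Int)))).foldl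
        (fun mx p => if pvVal grid p < 0 then max mx (-(pvVal grid p)) else mx) mx := by
  induction fuel generalizing r c mx with
  | zero =>
    have h0 : (N - max r c).toNat = 0 := by omega
    rw [h0]
    simp only [List.range_zero, List.map_nil, List.foldl_nil, walkA]
  | succ n ih =>
    by_cases hb : r = N ∨ c = N
    · have hm : max r c = N := by
        refine le_antisymm (max_le hr hc) ?_
        rcases hb with h | h
        · exact h ▸ le_max_left r c
        · exact h ▸ le_max_right r c
      have h0 : (N - max r c).toNat = 0 := by omega
      rw [h0]
      simp only [List.range_zero, List.map_nil, List.foldl_nil, walkA]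
      exact if_pos hb
    · rw [not_or] at hb
      have hm1 := le_max_left r c
      have hm2 := le_max_right r c
      have hmlt : max r c < N := by
        rcases max_cases r c with ⟨h, _⟩ | ⟨h, _⟩ <;> omega
      have hmax1 : max (r + 1) (c + 1) = max r c + 1 := by
        rcases max_cases r c with ⟨h, h'⟩ | ⟨h, h'⟩ <;>
          rcases max_cases (r + 1) (c + 1) with ⟨g, g'⟩ | ⟨g, g'⟩ <;> omega
      have hk : (N - max r c).toNat = (N - max (r + 1) (c + 1)).toNat + 1 := by
        rw [hmax1]; omega
      rw [hk, List.range_succ_eq_map]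
      simp only [List.map_cons, List.foldl_cons, List.map_map]
      have hfun : ((fun t : Nat => (r + (t : Int), c + (t : Int))) ∘ Nat.succ)
          = fun t : Nat => ((r + 1) + (t : Int), (c + 1) + (t : Int)) := by
        funext t
        simp only [Function.comp_apply, Prod.mk.injEq]
        constructor <;> push_cast <;> ring
      rw [hfun]
      have hstep : walkA grid N (n + 1) r c mx =
          walkA grid N n (r + 1) (c + 1)
            (if pvVal grid (r, c) < 0 then max mx (-(pvVal grid (r, c))) else mx) := by
        simp only [walkA, pvVal]
        rw [if_neg (by tauto)]
      rw [hstep, ih (r + 1) (c + 1) _ (by omega) (by omega) (by omega)]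
      simp [pvVal]

lemma pv_fold_neg (grid : List (List Int)) (l : List (Int × Int)) (mx : Int) :
    l.foldl (fun mx p => if pvVal grid p < 0 then max mx (-(pvVal grid p)) else mx) mx
      = ((l.filter (fun p => decide (pvVal grid p < 0))).map (fun p => -(pvVal grid p))).foldl max mx := by
  rw [PySem.List.foldl_ite_eq_foldl_filter (p := fun p => pvVal grid p < 0)
    (f := fun mx p => max mx (-(pvVal grid p)))]
  rw [List.foldl_map]

lemma pv_walk_val (grid : List (List Int)) (N r c : Int) (hr0 : 0 ≤ r) (hc0 : 0 ≤ c)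
    (hmin : min r c = 0) (hrN : r ≤ N) (hcN : c ≤ N) :
    walkA grid N N.toNat r c 0 = pvM N grid (r - c) := by
  have hm1 := le_max_left r c
  rw [pv_walk_eq grid N N.toNat r c 0 hrN hcN (by omega)]
  rw [pv_fold_neg]
  unfold pvM pvNegCells
  rw [List.filter_comm]
  have hperm := ((pv_diag_perm N r c hr0 hc0 hmin hrN hcN).filter
      (fun p => decide (pvVal grid p < 0))).map (fun p => -(pvVal grid p))
  exact List.Perm.foldl_op_eq hperm.symm

lemma pv_getD_fold (grid : List (List Int)) (l : List (Int × Int)) (d : PySem.Dict Int Int) (k : Int) :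
    (l.foldl (fun d p => d.modify (p.1 - p.2) 0 (fun m => max m (-(pvVal grid p)))) d).getD k 0
      = ((l.filter (fun p => decide (p.1 - p.2 = k))).map (fun p => -(pvVal grid p))).foldl max (d.getD k 0) := by
  induction l generalizing d with
  | nil => simp
  | cons p t ih =>
    simp only [List.foldl_cons, List.filter_cons]
    by_cases h : p.1 - p.2 = k
    · rw [ih]
      simp [h, max_comm]
    · rw [ih]
      simp [h, PySem.Dict.getD_modify, Ne.symm h]

lemma pv_alt_eq (N : Int) (grid : List (List Int)) :
    solve_alt N grid =
      ((PySem.Set.ofList ((pvNegCells N grid).map (fun p => p.1 - p.2))).map (pvM N grid)).sum := by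
  unfold solve_alt
  have h1 : ∀ (best : PySem.Dict Int Int) (i : Int),
      (PySem.List.pyRange 0 N 1).foldl (fun best j =>
        let v := PySem.List.pyGetD (PySem.List.pyGetD grid i []) j 0
        if v < 0 then best.modify (i - j) 0 (fun m => max m (-v)) else best) best
      = ((PySem.List.pyRange 0 N 1).map (fun j => (i, j))).foldl (fun best p =>
          if pvVal grid p < 0 then best.modify (p.1 - p.2) 0 (fun m => max m (-(pvVal grid p))) else best) best := by
    intro best i
    rw [List.foldl_map]
    rfl
  simp only [h1]
  rw [← List.foldl_flatMap]
  rw [show ((PySem.List.pyRange 0 N 1).flatMap (fun i => (PySem.List.pyRange 0 N 1).map (fun j => (i, j)))) = pvCells N from rfl]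
  rw [PySem.List.foldl_ite_eq_foldl_filter
    (p := fun p : Int × Int => pvVal grid p < 0)
    (f := fun (best : PySem.Dict Int Int) p => best.modify (p.1 - p.2) 0 (fun m => max m (-(pvVal grid p))))]
  rw [show ((pvCells N).filter fun p => decide (pvVal grid p < 0)) = pvNegCells N grid from rfl]
  have hkeys : ((pvNegCells N grid).foldl
      (fun d p => d.modify (p.1 - p.2) 0 (fun m => max m (-(pvVal grid p)))) PySem.Dict.empty).keys
      = PySem.Set.ofList ((pvNegCells N grid).map (fun p => p.1 - p.2)) := by
    rw [PySem.Dict.keys_foldl_modify_key (pvNegCells N grid) (fun p => p.1 - p.2) 0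
      (fun _ p => fun m => max m (-(pvVal grid p))) PySem.Dict.empty]
    simp [PySem.Set.update_nil_left]
  have hnd : ((pvNegCells N grid).foldl
      (fun d p => d.modify (p.1 - p.2) 0 (fun m => max m (-(pvVal grid p)))) PySem.Dict.empty).keys.Nodup := by
    exact PySem.Dict.nodup_keys_foldl_modify_key _ (fun p => p.1 - p.2) 0
      (fun _ p => fun m => max m (-(pvVal grid p))) _ (by simp)
  rw [PySem.Dict.values_eq_map_keys _ hnd 0, hkeys]
  congr 1
  apply List.map_congr_left
  intro k _
  rw [pv_getD_fold]
  simp [pvM, PySem.Dict.getD_empty]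

lemma pv_sum_pyRange (a b : Int) (f : Int → Int) :
    ((PySem.List.pyRange a b 1).map f).sum = ∑ d ∈ Finset.Ico a b, f d := by
  rw [← List.sum_toFinset f (PySem.List.nodup_pyRange_one a b)]
  congr 1
  ext x
  simp [List.mem_toFinset, PySem.List.mem_pyRange_one, Finset.mem_Ico]

lemma pv_A_eq (N : Int) (grid : List (List Int)) :
    solve N grid = ((PySem.List.pyRange 0 N 1).map (fun i =>
      ((PySem.Set.ofList [(i, (0:Int)), ((0:Int), i)]).map
        (fun rc => walkA grid N N.toNat rc.1 rc.2 0)).sum)).sum := by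
  unfold solve
  simp only [PySem.List.foldl_add, zero_add]

theorem pv_main (N : Int) (grid : List (List Int)) : solve N grid = solve_alt N grid := by
  by_cases hN : N ≤ 0
  · have h0 : PySem.List.pyRange 0 N 1 = [] := PySem.List.pyRange_one_eq_nil hN
    simp [solve, solve_alt, h0, PySem.Dict.empty, PySem.Dict.values]
  · rw [pv_alt_eq, pv_A_eq, pv_sum_pyRange]
    have hKnd := PySem.Set.nodup_ofList ((pvNegCells N grid).map (fun p => p.1 - p.2))
    rw [← List.sum_toFinset _ hKnd]
    have hKfin : (PySem.Set.ofList ((pvNegCells N grid).map (fun p => p.1 - p.2))).toFinset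
        = ((pvNegCells N grid).map (fun p => p.1 - p.2)).toFinset := by
      ext x; simp [List.mem_toFinset, PySem.Set.mem_ofList]
    rw [hKfin]
    have payload_eq : ∀ i ∈ Finset.Ico (0:Int) N,
        ((PySem.Set.ofList [(i, (0:Int)), ((0:Int), i)]).map
          (fun rc => walkA grid N N.toNat rc.1 rc.2 0)).sum
        = if i = 0 then pvM N grid 0 else pvM N grid i + pvM N grid (-i) := by
      intro i hi
      rw [Finset.mem_Ico] at hi
      by_cases h0 : i = 0
      · subst h0
        have hset : PySem.Set.ofList [((0:Int), (0:Int)), (0, 0)] = [(0, 0)] := by decide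
        rw [hset, if_pos rfl]
        simp only [List.map_cons, List.map_nil, List.sum_cons, List.sum_nil, add_zero]
        have := pv_walk_val grid N 0 0 le_rfl le_rfl (by simp) (by omega) (by omega)
        simpa using this
      · have hset : PySem.Set.ofList [(i, (0:Int)), ((0:Int), i)] = [(i, 0), (0, i)] := by
          simp [PySem.Set.ofList, PySem.Set.add, h0]
        rw [hset, if_neg h0]
        simp only [List.map_cons, List.map_nil, List.sum_cons, List.sum_nil, add_zero]
        have hw1 := pv_walk_val grid N i 0 hi.1 le_rfl (min_eq_right hi.1) (le_of_lt hi.2) (by omega)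
        have hw2 := pv_walk_val grid N 0 i le_rfl hi.1 (min_eq_left hi.1) (by omega) (le_of_lt hi.2)
        simp only [sub_zero] at hw1
        simp only [zero_sub] at hw2
        simp [hw1, hw2]
    rw [Finset.sum_congr rfl payload_eq]
    have split0 : Finset.Ico (0:Int) N = insert 0 (Finset.Ico 1 N) := by
      ext x; simp only [Finset.mem_Ico, Finset.mem_insert]; omega
    have h0notin : (0:Int) ∉ Finset.Ico (1:Int) N := by simp
    rw [split0, Finset.sum_insert h0notin, if_pos rfl]
    rw [Finset.sum_congr rfl (fun i hi => if_neg (by rw [Finset.mem_Ico] at hi; omega))]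
    rw [Finset.sum_add_distrib]
    have hneg : ∑ i ∈ Finset.Ico (1:Int) N, pvM N grid (-i)
        = ∑ d ∈ Finset.Ico (1 - N) (0:Int), pvM N grid d := by
      refine Finset.sum_bij' (fun a _ => -a) (fun b _ => -b) ?_ ?_ ?_ ?_ ?_
      · intro a ha; simp only [Finset.mem_Ico] at ha ⊢; omega
      · intro a ha; simp only [Finset.mem_Ico] at ha ⊢; omega
      · intro a _; ring
      · intro a _; ring
      · intro a _; rfl
    rw [hneg]
    have hsub : ((pvNegCells N grid).map (fun p => p.1 - p.2)).toFinset.sum (pvM N grid)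
        = ∑ d ∈ Finset.Ico (1 - N) N, pvM N grid d := by
      refine Finset.sum_subset ?_ ?_
      · intro k hk
        simp only [List.mem_toFinset, List.mem_map] at hk
        obtain ⟨p, hp, rfl⟩ := hk
        have hc := (List.mem_filter.mp hp).1
        rw [pv_mem_cells] at hc
        rw [Finset.mem_Ico]; omega
      · intro d _ hd
        have hnil : ((pvNegCells N grid).filter (fun p => decide (p.1 - p.2 = d))) = [] := by
          rw [List.filter_eq_nil_iff]
          intro p hp hpd
          apply hd
          simp only [List.mem_toFinset, List.mem_map]
          exact ⟨p, hp, by simpa using hpd⟩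
        simp [pvM, hnil]
    rw [hsub]
    have hu1 : ∑ d ∈ Finset.Ico (1 - N) (0:Int), pvM N grid d + ∑ d ∈ Finset.Ico (0:Int) N, pvM N grid d
        = ∑ d ∈ Finset.Ico (1 - N) N, pvM N grid d := by
      rw [← Finset.sum_union (Finset.Ico_disjoint_Ico_consecutive _ _ _),
        Finset.Ico_union_Ico_eq_Ico (by omega) (by omega)]
    have hu2 : ∑ d ∈ Finset.Ico (0:Int) N, pvM N grid d
        = pvM N grid 0 + ∑ d ∈ Finset.Ico (1:Int) N, pvM N grid d := by
      rw [split0, Finset.sum_insert h0notin]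
    linarith

-- ===== VERDICT (by name: the statement is the Claim_ definition above) =====
theorem solve_spec : Claim_equal_solve := by
  intro N grid _ _
  unfold Spec_solve
  exact pv_main N grid
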